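-- pv_equiv track=rewrite | github.com/pvinnbru/ChainIQ-START-Hack-2026 | request-evaluation/supplier_matrix.py | _tokenize_when
-- ===== SOURCE A (Python) =====
-- def _tokenize_when(expr: str) -> list[str]:
--     """
--     Split a WHEN expression into a flat token list.
--
--     Handles:
--     - Quoted strings (single or double quotes) as single tokens even when
--       they contain spaces, e.g. "Cloud Compute" → one token '"Cloud Compute"'
--     - Two-char operators before single-char: >=, <=, !=
--     - Single-char operators and parens: > < = ( )
--     - Identifiers, keywords, and numeric literals
--     """
--     tokens: list[str] = []
--     i = 0
--     n = len(expr)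
--     while i < n:
--         c = expr[i]
--         if c.isspace():
--             i += 1
--             continue
--         # Quoted string — scan to closing quote and emit as a single token.
--         # ISSUE-017: handle backslash escape sequences so that an escaped quote
--         # (e.g. "O\'Brien") does not prematurely terminate the string scan.
--         if c in ('"', "'"):
--             quote = c
--             j = i + 1
--             while j < n:
--                 if expr[j] == "\\" and j + 1 < n:
--                     j += 2  # skip escape character and the escaped character
--                     continue
--                 if expr[j] == quote:
--                     break
--                 j += 1
--             tokens.append(expr[i : j + 1])  # includes both quote chars
--             i = j + 1
--             continue
--         # Two-char operators must be checked before single-char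
--         if i + 1 < n and expr[i : i + 2] in (">=", "<=", "!="):
--             tokens.append(expr[i : i + 2])
--             i += 2
--             continue
--         # Single-char operators / parens
--         if c in (">", "<", "=", "(", ")"):
--             tokens.append(c)
--             i += 1
--             continue
--         # Identifier, keyword, or number
--         j = i
--         while j < n and not expr[j].isspace() and expr[j] not in (
--             ">", "<", "=", "(", ")", '"', "'"
--         ):
--             j += 1
--         tokens.append(expr[i:j])
--         i = j
--     return tokens
-- ===== SOURCE B (Python) =====
-- def _tokenize_when(expr: str) -> list[str]:
--     """Single-pass character DFA: states idle / word / str / cmp, one step per char."""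
--     tokens: list[str] = []
--     state = ("idle",)
--     for ch in expr:
--         state, emitted = _step(state, ch)
--         tokens.extend(emitted)
--     tokens.extend(_flush(state))
--     return tokens
--
--
-- def _step(state, ch):
--     kind = state[0]
--     if kind == "str":
--         _, quote, buf, esc = state
--         buf.append(ch)
--         if esc:
--             return ("str", quote, buf, False), []
--         if ch == "\\":
--             return ("str", quote, buf, True), []
--         if ch == quote:
--             return ("idle",), ["".join(buf)]
--         return ("str", quote, buf, False), []
--     if kind == "cmp":
--         c = state[1]
--         if ch == "=":
--             return ("idle",), [c + "="]
--         if c == "!":  # lone '!' begins an identifier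
--             return _step_word(["!"], ch)
--         new_state, emitted = _step_idle(ch)
--         return new_state, [c] + emitted
--     if kind == "word":
--         return _step_word(state[1], ch)
--     return _step_idle(ch)
--
--
-- def _step_idle(ch):
--     if ch.isspace():
--         return ("idle",), []
--     if ch in "\"'":
--         return ("str", ch, [ch], False), []
--     if ch in "><!":
--         return ("cmp", ch), []
--     if ch in "=()":
--         return ("idle",), [ch]
--     return ("word", [ch]), []
--
--
-- def _step_word(buf, ch):
--     if ch.isspace() or ch in ">=<()\"'":
--         new_state, emitted = _step_idle(ch)
--         return new_state, ["".join(buf)] + emitted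
--     buf.append(ch)
--     return ("word", buf), []
--
--
-- def _flush(state):
--     kind = state[0]
--     if kind == "idle":
--         return []
--     if kind == "str":
--         return ["".join(state[2])]
--     if kind == "word":
--         return ["".join(state[1])]
--     return [state[1]]
-- ===== Notes on version B (the rewrite author's own statement) =====
-- stated objective: alternative
-- what changed: A is an index-jumping scanner with nested inner while-loops, one-character lookahead and slicing; B is a single character-at-a-time finite-state machine (states idle/word/string/cmp) that never indexes or slices the input.
import Mathlib
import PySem

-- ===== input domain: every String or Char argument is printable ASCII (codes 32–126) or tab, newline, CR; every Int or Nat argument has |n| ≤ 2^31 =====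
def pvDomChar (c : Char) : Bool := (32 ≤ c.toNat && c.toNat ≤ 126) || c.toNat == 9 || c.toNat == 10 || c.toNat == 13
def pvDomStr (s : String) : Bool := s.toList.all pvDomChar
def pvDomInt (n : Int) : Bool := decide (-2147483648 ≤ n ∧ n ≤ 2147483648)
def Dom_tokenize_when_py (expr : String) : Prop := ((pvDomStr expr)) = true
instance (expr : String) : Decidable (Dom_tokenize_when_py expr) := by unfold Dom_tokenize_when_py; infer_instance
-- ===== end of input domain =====

-- B replaces A's index-jumping scanner (inner scan loops, lookahead, slices) by a
-- single character-at-a-time DFA with explicit states; alternative decomposition, same O(n) cost.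


-- ===== PORT A =====
-- characters that terminate an identifier scan in A (the tuple in the inner while)
def pvWordStopA (c : Char) : Bool :=
  c == '>' || c == '<' || c == '=' || c == '(' || c == ')' || c == '"' || c == '\''

-- the single-char operator tuple ('>', '<', '=', '(', ')')
def pvSingleA (c : Char) : Bool :=
  c == '>' || c == '<' || c == '=' || c == '(' || c == ')'

-- membership of expr[i:i+2] in (">=", "<=", "!=")
def pvOp2A (l : List Char) : Bool :=
  l == ['>', '='] || l == ['<', '='] || l == ['!', '=']

-- inner while of the quoted-string branch: advance j past escape pairs until the quote
def pvScanStrA (cs : List Char) (n : Nat) (q : Char) (j : Nat) : Nat :=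
  if h : j < n then
    if cs.getD j ' ' == '\\' && decide (j + 1 < n) then pvScanStrA cs n q (j + 2)
    else if cs.getD j ' ' == q then j
    else pvScanStrA cs n q (j + 1)
  else j
termination_by n - j

-- inner while of the identifier branch
def pvScanWordA (cs : List Char) (n : Nat) (j : Nat) : Nat :=
  if h : j < n then
    if !PySem.Chars.isspace (cs.getD j ' ') && !pvWordStopA (cs.getD j ' ') then
      pvScanWordA cs n (j + 1)
    else j
  else j
termination_by n - j

theorem pvScanStrA_ge (cs : List Char) (n : Nat) (q : Char) (j : Nat) :
    j ≤ pvScanStrA cs n q j := by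
  fun_induction pvScanStrA <;> omega

theorem pvScanWordA_ge (cs : List Char) (n : Nat) (j : Nat) :
    j ≤ pvScanWordA cs n j := by
  fun_induction pvScanWordA <;> omega

theorem pvScanWordA_gt (cs : List Char) (n : Nat) (i : Nat) (h : i < n)
    (h1 : PySem.Chars.isspace (cs.getD i ' ') = false)
    (h2 : pvWordStopA (cs.getD i ' ') = false) :
    i < pvScanWordA cs n i := by
  rw [pvScanWordA]
  simp only [h, h1, h2]
  exact Nat.lt_of_lt_of_le (Nat.lt_succ_self i) (pvScanWordA_ge cs n (i + 1))

-- the outer while loop of A, over the index i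
def pvLoopA (cs : List Char) (n : Nat) (i : Nat) : List String :=
  if h : i < n then
    let c := cs.getD i ' '
    if PySem.Chars.isspace c then pvLoopA cs n (i + 1)
    else if c == '"' || c == '\'' then
      let j := pvScanStrA cs n c (i + 1)
      String.ofList (PySem.List.slice cs (some (i : Int)) (some ((j + 1 : Nat) : Int))) ::
        pvLoopA cs n (j + 1)
    else if decide (i + 1 < n) && pvOp2A (PySem.List.slice cs (some (i : Int)) (some ((i + 2 : Nat) : Int))) then
      String.ofList (PySem.List.slice cs (some (i : Int)) (some ((i + 2 : Nat) : Int))) ::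
        pvLoopA cs n (i + 2)
    else if pvSingleA c then
      String.ofList [c] :: pvLoopA cs n (i + 1)
    else
      let j := pvScanWordA cs n i
      String.ofList (PySem.List.slice cs (some (i : Int)) (some ((j : Nat) : Int))) ::
        pvLoopA cs n j
  else []
termination_by n - i
decreasing_by
  · omega
  · have := pvScanStrA_ge cs n (cs.getD i ' ') (i + 1); omega
  · omega
  · omega
  · have hgt : i < pvScanWordA cs n i := by
      apply pvScanWordA_gt cs n i h
      · simpa using ‹¬PySem.Chars.isspace (cs.getD i ' ') = true›
      · simp only [pvWordStopA]
        have hq := ‹¬(cs.getD i ' ' == '"' || cs.getD i ' ' == '\'') = true›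
        have hs := ‹¬pvSingleA (cs.getD i ' ') = true›
        simp only [pvSingleA, Bool.or_eq_true, beq_iff_eq, not_or] at hq hs
        simp only [Bool.or_eq_false_iff, beq_eq_false_iff_ne, ne_eq]
        tauto
    omega

def tokenize_when_py (expr : String) : List String :=
  pvLoopA expr.toList expr.toList.length 0

-- ===== PORT B =====
inductive PvState where
  | idle : PvState
  | word : List Char → PvState
  | strS : Char → List Char → Bool → PvState
  | cmp : Char → PvState
deriving DecidableEq, Repr

def pvStepIdle (ch : Char) : PvState × List String :=
  if PySem.Chars.isspace ch then (.idle, [])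
  else if ch == '"' || ch == '\'' then (.strS ch [ch] false, [])
  else if ch == '>' || ch == '<' || ch == '!' then (.cmp ch, [])
  else if ch == '=' || ch == '(' || ch == ')' then (.idle, [String.ofList [ch]])
  else (.word [ch], [])

def pvStepWord (buf : List Char) (ch : Char) : PvState × List String :=
  if PySem.Chars.isspace ch ||
     (ch == '>' || ch == '=' || ch == '<' || ch == '(' || ch == ')' || ch == '"' || ch == '\'') then
    let r := pvStepIdle ch
    (r.1, String.ofList buf :: r.2)
  else (.word (buf ++ [ch]), [])

def pvStep (st : PvState) (ch : Char) : PvState × List String :=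
  match st with
  | .strS q buf esc =>
      if esc then (.strS q (buf ++ [ch]) false, [])
      else if ch == '\\' then (.strS q (buf ++ [ch]) true, [])
      else if ch == q then (.idle, [String.ofList (buf ++ [ch])])
      else (.strS q (buf ++ [ch]) false, [])
  | .cmp c =>
      if ch == '=' then (.idle, [String.ofList [c, '=']])
      else if c == '!' then pvStepWord ['!'] ch
      else
        let r := pvStepIdle ch
        (r.1, String.ofList [c] :: r.2)
  | .word buf => pvStepWord buf ch
  | .idle => pvStepIdle ch

def pvFlush : PvState → List String
  | .idle => []
  | .strS _ buf _ => [String.ofList buf]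
  | .word buf => [String.ofList buf]
  | .cmp c => [String.ofList [c]]

def pvRun (st : PvState) : List Char → List String
  | [] => pvFlush st
  | ch :: rest =>
      let r := pvStep st ch
      r.2 ++ pvRun r.1 rest

def tokenize_when_py_alt (expr : String) : List String :=
  pvRun .idle expr.toList

-- ===== PRECONDITION & SPEC =====
def Spec_tokenize_when_py (expr : String) (out : List String) : Prop := out = tokenize_when_py_alt expr
instance (expr : String) (out : List String) : Decidable (Spec_tokenize_when_py expr out) := by unfold Spec_tokenize_when_py; infer_instance

-- ===== CLAIM (what is proved, stated in full; the proofs are below) =====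
def Claim_equal_tokenize_when_py : Prop := ∀ (expr : String), Dom_tokenize_when_py expr → Spec_tokenize_when_py expr (tokenize_when_py expr)

-- ===== LEMMAS AND PROOFS =====

theorem pv_str_bridge (cs : List Char) (q : Char) (hq : q = '"' ∨ q = '\'') :
    ∀ j buf, pvRun (.strS q buf false) (cs.drop j) =
      String.ofList (buf ++ (cs.drop j).take (pvScanStrA cs cs.length q j + 1 - j)) ::
        pvRun .idle (cs.drop (pvScanStrA cs cs.length q j + 1)) := by
  have hqb : q ≠ '\\' := by rcases hq with h | h <;> simp [h]
  have hnq : ¬'\\' = q := fun h => hqb h.symm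
  suffices H : ∀ m j buf, cs.length - j ≤ m →
      pvRun (.strS q buf false) (cs.drop j) =
      String.ofList (buf ++ (cs.drop j).take (pvScanStrA cs cs.length q j + 1 - j)) ::
        pvRun .idle (cs.drop (pvScanStrA cs cs.length q j + 1)) by
    intro j buf; exact H (cs.length - j) j buf le_rfl
  intro m
  induction m with
  | zero =>
    intro j buf hm
    have hj : cs.length ≤ j := by omega
    have hscan : pvScanStrA cs cs.length q j = j := by
      rw [pvScanStrA]; simp [Nat.not_lt.mpr hj]
    rw [hscan, List.drop_eq_nil_of_le hj, List.drop_eq_nil_of_le (by omega : cs.length ≤ j + 1)]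
    simp [pvRun, pvFlush]
  | succ m ih =>
    intro j buf hm
    by_cases hj : j < cs.length
    · have hd : cs.drop j = cs[j] :: cs.drop (j + 1) := List.drop_eq_getElem_cons hj
      have hgd : cs.getD j ' ' = cs[j] := List.getD_eq_getElem cs ' ' hj
      by_cases hbs : cs[j] = '\\'
      · by_cases h2 : j + 1 < cs.length
        · -- escape pair: consume two characters
          have hd2 : cs.drop (j + 1) = cs[j + 1] :: cs.drop (j + 2) := List.drop_eq_getElem_cons h2
          have hscan : pvScanStrA cs cs.length q j = pvScanStrA cs cs.length q (j + 2) := by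
            rw [pvScanStrA]; simp [hj, hbs, h2]
          have hge : j + 2 ≤ pvScanStrA cs cs.length q (j + 2) := pvScanStrA_ge cs cs.length q (j + 2)
          have hLHS : pvRun (.strS q buf false) (cs.drop j) =
              pvRun (.strS q (buf ++ ['\\', cs[j + 1]]) false) (cs.drop (j + 2)) := by
            rw [hd, hd2]; simp [pvRun, pvStep, hbs]
          rw [hLHS, ih (j + 2) (buf ++ ['\\', cs[j + 1]]) (by omega), hscan]
          congr 2
          rw [hd, hd2]
          have hnum : pvScanStrA cs cs.length q (j + 2) + 1 - j =
              (pvScanStrA cs cs.length q (j + 2) + 1 - (j + 2)) + 2 := by omega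
          rw [hnum]
          simp [hbs, List.take_succ_cons]
          rw [hd2, List.take_succ_cons]
        · -- trailing backslash: j + 1 = length
          have hj1 : j + 1 = cs.length := by omega
          have hscan : pvScanStrA cs cs.length q j = j + 1 := by
            rw [pvScanStrA]
            simp [hj, hbs, h2, hnq]
            rw [pvScanStrA]; simp [h2]
          have hnil : cs.drop (j + 1) = [] := List.drop_eq_nil_of_le (by omega)
          rw [hscan, hd, hnil]
          simp [pvRun, pvStep, pvFlush, hbs, List.drop_eq_nil_of_le (by omega : cs.length ≤ j + 2),
            show j + 1 + 1 - j = 2 from by omega]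
      · by_cases hcq : cs[j] = q
        · -- closing quote
          have hscan : pvScanStrA cs cs.length q j = j := by
            rw [pvScanStrA]; simp [hj, hcq, hqb]
          rw [hscan, hd]
          simp [pvRun, pvStep, hcq, hqb]
        · -- ordinary character inside the string
          have hscan : pvScanStrA cs cs.length q j = pvScanStrA cs cs.length q (j + 1) := by
            rw [pvScanStrA]
            rcases Nat.lt_or_ge (j+1) cs.length with h2 | h2
            · simp [hj, hbs, hcq]
            · simp [hj, hcq, Nat.not_lt.mpr h2]
          have hge : j + 1 ≤ pvScanStrA cs cs.length q (j + 1) := pvScanStrA_ge cs cs.length q (j + 1)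
          have hLHS : pvRun (.strS q buf false) (cs.drop j) =
              pvRun (.strS q (buf ++ [cs[j]]) false) (cs.drop (j + 1)) := by
            rw [hd]; simp [pvRun, pvStep, hbs, hcq]
          rw [hLHS, ih (j + 1) (buf ++ [cs[j]]) (by omega), hscan]
          congr 2
          rw [hd]
          have hnum : pvScanStrA cs cs.length q (j + 1) + 1 - j =
              (pvScanStrA cs cs.length q (j + 1) + 1 - (j + 1)) + 1 := by omega
          rw [hnum]
          simp []
          rw [hd, List.take_succ_cons]
    · have hjn : cs.length ≤ j := by omega
      have hscan : pvScanStrA cs cs.length q j = j := by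
        rw [pvScanStrA]; simp [Nat.not_lt.mpr hjn]
      rw [hscan, List.drop_eq_nil_of_le hjn, List.drop_eq_nil_of_le (by omega : cs.length ≤ j + 1)]
      simp [pvRun, pvFlush]

theorem pv_word_bridge (cs : List Char) :
    ∀ j buf, pvRun (.word buf) (cs.drop j) =
      String.ofList (buf ++ (cs.drop j).take (pvScanWordA cs cs.length j - j)) ::
        pvRun .idle (cs.drop (pvScanWordA cs cs.length j)) := by
  suffices H : ∀ m j buf, cs.length - j ≤ m →
      pvRun (.word buf) (cs.drop j) =
      String.ofList (buf ++ (cs.drop j).take (pvScanWordA cs cs.length j - j)) ::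
        pvRun .idle (cs.drop (pvScanWordA cs cs.length j)) by
    intro j buf; exact H (cs.length - j) j buf le_rfl
  intro m
  induction m with
  | zero =>
    intro j buf hm
    have hj : cs.length ≤ j := by omega
    have hscan : pvScanWordA cs cs.length j = j := by
      rw [pvScanWordA]; simp [Nat.not_lt.mpr hj]
    rw [hscan, List.drop_eq_nil_of_le hj]
    simp [pvRun, pvFlush]
  | succ m ih =>
    intro j buf hm
    by_cases hj : j < cs.length
    · have hd : cs.drop j = cs[j] :: cs.drop (j + 1) := List.drop_eq_getElem_cons hj
      have hgd : cs.getD j ' ' = cs[j] := List.getD_eq_getElem cs ' ' hj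
      by_cases hstop : (PySem.Chars.isspace cs[j] || pvWordStopA cs[j]) = true
      · -- boundary character: the word token closes and cs[j] is handled from idle
        have hscan : pvScanWordA cs cs.length j = j := by
          rw [pvScanWordA]
          rcases Bool.or_eq_true_iff.mp hstop with h | h <;> simp [hj, h]
        have hcond : (PySem.Chars.isspace cs[j] ||
            (cs[j] == '>' || cs[j] == '=' || cs[j] == '<' || cs[j] == '(' || cs[j] == ')' ||
             cs[j] == '"' || cs[j] == '\'')) = true := by
          simp only [pvWordStopA, Bool.or_eq_true] at hstop ⊢
          tauto
        rw [hscan, hd]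
        simp only [pvRun, pvStep, pvStepWord, hcond, if_true, Nat.sub_self, List.take_zero,
          List.append_nil, List.cons_append]
      · -- ordinary word character: append and continue
        have hstop' : (PySem.Chars.isspace cs[j] || pvWordStopA cs[j]) = false := by
          simpa using hstop
        have hsp : PySem.Chars.isspace cs[j] = false := by
          rcases Bool.or_eq_false_iff.mp hstop' with ⟨h, _⟩; exact h
        have hws : pvWordStopA cs[j] = false := by
          rcases Bool.or_eq_false_iff.mp hstop' with ⟨_, h⟩; exact h
        have hscan : pvScanWordA cs cs.length j = pvScanWordA cs cs.length (j + 1) := by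
          rw [pvScanWordA]; simp [hj, hsp, hws]
        have hge : j + 1 ≤ pvScanWordA cs cs.length (j + 1) := pvScanWordA_ge cs cs.length (j + 1)
        have hcond : (PySem.Chars.isspace cs[j] ||
            (cs[j] == '>' || cs[j] == '=' || cs[j] == '<' || cs[j] == '(' || cs[j] == ')' ||
             cs[j] == '"' || cs[j] == '\'')) = false := by
          simp only [pvWordStopA, Bool.or_eq_false_iff] at hstop' ⊢
          tauto
        have hLHS : pvRun (.word buf) (cs.drop j) =
            pvRun (.word (buf ++ [cs[j]])) (cs.drop (j + 1)) := by
          rw [hd]; simp [pvRun, pvStep, pvStepWord, hcond]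
        rw [hLHS, ih (j + 1) (buf ++ [cs[j]]) (by omega), hscan]
        congr 2
        have hnum : pvScanWordA cs cs.length (j + 1) - j =
            (pvScanWordA cs cs.length (j + 1) - (j + 1)) + 1 := by omega
        rw [hnum]
        simp only [List.append_assoc, List.singleton_append]
        rw [hd, List.take_succ_cons]
    · have hjn : cs.length ≤ j := by omega
      have hscan : pvScanWordA cs cs.length j = j := by
        rw [pvScanWordA]; simp [Nat.not_lt.mpr hjn]
      rw [hscan, List.drop_eq_nil_of_le hjn]
      simp [pvRun, pvFlush]

theorem pv_word_tail (cs : List Char) (i : Nat) (hi : i < cs.length)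
    (hsp : PySem.Chars.isspace cs[i] = false) (hws : pvWordStopA cs[i] = false) :
    pvRun (.word [cs[i]]) (cs.drop (i + 1)) =
      String.ofList ((cs.drop i).take (pvScanWordA cs cs.length i - i)) ::
        pvRun .idle (cs.drop (pvScanWordA cs cs.length i)) := by
  have hscan : pvScanWordA cs cs.length i = pvScanWordA cs cs.length (i + 1) := by
    rw [pvScanWordA]; simp [hi, hsp, hws]
  have hge := pvScanWordA_ge cs cs.length (i + 1)
  rw [pv_word_bridge cs (i + 1) [cs[i]], ← hscan]
  congr 2
  rw [List.drop_eq_getElem_cons hi]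
  have hnum : pvScanWordA cs cs.length i - i = (pvScanWordA cs cs.length i - (i + 1)) + 1 := by
    omega
  rw [hnum, List.take_succ_cons]
  simp [hscan]

theorem pv_main (cs : List Char) : ∀ i, pvLoopA cs cs.length i = pvRun .idle (cs.drop i) := by
  suffices H : ∀ m i, cs.length - i ≤ m →
      pvLoopA cs cs.length i = pvRun .idle (cs.drop i) by
    intro i; exact H (cs.length - i) i le_rfl
  intro m
  induction m with
  | zero =>
    intro i hm
    have hi : cs.length ≤ i := by omega
    rw [pvLoopA]
    simp [Nat.not_lt.mpr hi, List.drop_eq_nil_of_le hi, pvRun, pvFlush]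
  | succ m ih =>
    intro i hm
    by_cases hi : i < cs.length
    · have hd : cs.drop i = cs[i] :: cs.drop (i + 1) := List.drop_eq_getElem_cons hi
      have hgd : cs.getD i ' ' = cs[i] := List.getD_eq_getElem cs ' ' hi
      have hsl : ∀ b : Nat, PySem.List.slice cs (some (i : Int)) (some ((b : Nat) : Int)) =
          (cs.drop i).take (b - i) := fun b => PySem.List.slice_natCast cs i b
      rw [pvLoopA, dif_pos hi]
      simp only [hgd]
      by_cases hsp : PySem.Chars.isspace cs[i] = true
      · rw [if_pos hsp, ih (i + 1) (by omega), hd]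
        simp [pvRun, pvStep, pvStepIdle, hsp]
      · have hspf : PySem.Chars.isspace cs[i] = false := by simpa using hsp
        rw [if_neg hsp]
        by_cases hq2 : (cs[i] == '"' || cs[i] == '\'') = true
        · -- quoted string
          rw [if_pos hq2]
          have hq' : cs[i] = '"' ∨ cs[i] = '\'' := by simpa using hq2
          have hge := pvScanStrA_ge cs cs.length cs[i] (i + 1)
          have hB : pvRun .idle (cs.drop i) =
              pvRun (.strS cs[i] [cs[i]] false) (cs.drop (i + 1)) := by
            rw [hd]; simp [pvRun, pvStep, pvStepIdle, hspf, hq2]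
          rw [hB, pv_str_bridge cs cs[i] hq' (i + 1) [cs[i]],
            ← ih (pvScanStrA cs cs.length cs[i] (i + 1) + 1) (by omega)]
          congr 2
          rw [hsl (pvScanStrA cs cs.length cs[i] (i + 1) + 1), hd]
          have hnum : pvScanStrA cs cs.length cs[i] (i + 1) + 1 - i =
              (pvScanStrA cs cs.length cs[i] (i + 1) + 1 - (i + 1)) + 1 := by omega
          rw [hnum, List.take_succ_cons]
          simp
        · have hq2f : (cs[i] == '"' || cs[i] == '\'') = false := by simpa using hq2
          rw [if_neg hq2]
          by_cases hc3 : (cs[i] == '>' || cs[i] == '<' || cs[i] == '!') = true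
          · -- comparison starter
            have hB0 : pvRun .idle (cs.drop i) = pvRun (.cmp cs[i]) (cs.drop (i + 1)) := by
              rw [hd]; simp [pvRun, pvStep, pvStepIdle, hspf, hq2f, hc3]
            have hc' : (cs[i] = '>' ∨ cs[i] = '<') ∨ cs[i] = '!' := by simpa using hc3
            by_cases h2 : i + 1 < cs.length
            · have hd2 : cs.drop (i + 1) = cs[i + 1] :: cs.drop (i + 2) :=
                List.drop_eq_getElem_cons h2
              have hsl2 : PySem.List.slice cs (some (i : Int)) (some ((i + 2 : Nat) : Int)) =
                  [cs[i], cs[i + 1]] := by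
                rw [hsl (i + 2), hd, hd2, show i + 2 - i = 2 from by omega]
                rfl
              by_cases heq : cs[i + 1] = '='
              · -- two-char operator
                have hop : pvOp2A [cs[i], cs[i + 1]] = true := by
                  rcases hc' with (h | h) | h <;> simp [pvOp2A, h, heq]
                rw [if_pos (by rw [hsl2]; simp [h2, hop])]
                rw [ih (i + 2) (by omega), hsl2]
                rw [hB0, hd2]
                simp [pvRun, pvStep, heq]
              · -- lookahead is not '=': single op or identifier
                have hop : pvOp2A [cs[i], cs[i + 1]] = false := by
                  simp [pvOp2A, heq]
                rw [if_neg (by rw [hsl2]; simp [hop])]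
                rcases hc' with (h | h) | h
                · rw [if_pos (by simp [pvSingleA, h]), ih (i + 1) (by omega), hd2,
                    hB0, hd2]
                  simp [pvRun, pvStep, heq, h]
                · rw [if_pos (by simp [pvSingleA, h]), ih (i + 1) (by omega), hd2,
                    hB0, hd2]
                  simp [pvRun, pvStep, heq, h]
                · -- '!': identifier starting with '!'
                  rw [if_neg (by simp [pvSingleA, h])]
                  have hws : pvWordStopA cs[i] = false := by simp [pvWordStopA, h]
                  have hB1 : pvRun .idle (cs.drop i) =
                      pvRun (.word [cs[i]]) (cs.drop (i + 1)) := by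
                    rw [hB0, hd2]
                    simp [pvRun, pvStep, pvStepWord, heq, h]
                  rw [hB1, pv_word_tail cs i hi hspf hws,
                    ← ih (pvScanWordA cs cs.length i) (by
                      have := pvScanWordA_ge cs cs.length (i + 1)
                      have hscan : pvScanWordA cs cs.length i =
                          pvScanWordA cs cs.length (i + 1) := by
                        rw [pvScanWordA]; simp [hi, hspf, hws]
                      omega),
                    hsl (pvScanWordA cs cs.length i)]
            · -- i + 1 = length: end of input after the comparison char
              have hnil : cs.drop (i + 1) = [] := List.drop_eq_nil_of_le (by omega)
              rw [if_neg (by simp [h2])]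
              rcases hc' with (h | h) | h
              · rw [if_pos (by simp [pvSingleA, h]), ih (i + 1) (by omega), hnil,
                  hB0, hnil]
                simp [pvRun, pvFlush]
              · rw [if_pos (by simp [pvSingleA, h]), ih (i + 1) (by omega), hnil,
                  hB0, hnil]
                simp [pvRun, pvFlush]
              · rw [if_neg (by simp [pvSingleA, h])]
                have hws : pvWordStopA cs[i] = false := by simp [pvWordStopA, h]
                have hscan : pvScanWordA cs cs.length i = i + 1 := by
                  rw [pvScanWordA]
                  simp [hi, hspf, hws]
                  rw [pvScanWordA]; simp [h2]
                rw [hscan, hsl (i + 1), ih (i + 1) (by omega), hnil,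
                  hB0, hnil, hd, hnil, show i + 1 - i = 1 from by omega]
                simp [pvRun, pvFlush]
          · have hc3f : (cs[i] == '>' || cs[i] == '<' || cs[i] == '!') = false := by
              simpa using hc3
            have hne : (¬cs[i] = '>' ∧ ¬cs[i] = '<') ∧ ¬cs[i] = '!' := by
              simpa [not_or] using hc3
            have hop2 : (decide (i + 1 < cs.length) &&
                pvOp2A (PySem.List.slice cs (some (i : Int)) (some ((i + 2 : Nat) : Int)))) = false := by
              by_cases h2 : i + 1 < cs.length
              · have hd2 : cs.drop (i + 1) = cs[i + 1] :: cs.drop (i + 2) :=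
                  List.drop_eq_getElem_cons h2
                have hsl2 : PySem.List.slice cs (some (i : Int)) (some ((i + 2 : Nat) : Int)) =
                    [cs[i], cs[i + 1]] := by
                  rw [hsl (i + 2), hd, hd2, show i + 2 - i = 2 from by omega]
                  rfl
                rw [hsl2]; simp [pvOp2A, hne.1.1, hne.1.2, hne.2]
              · simp [h2]
            rw [if_neg (by simp only [hop2]; simp)]
            by_cases hep : (cs[i] == '=' || cs[i] == '(' || cs[i] == ')') = true
            · -- '=', '(' or ')'
              have hep' : (cs[i] = '=' ∨ cs[i] = '(') ∨ cs[i] = ')' := by simpa using hep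
              rw [if_pos (by rcases hep' with (h | h) | h <;> simp [pvSingleA, h]),
                ih (i + 1) (by omega), hd]
              simp [pvRun, pvStep, pvStepIdle, hspf, hq2f, hc3f, hep]
            · -- ordinary identifier character
              have hepf : (¬cs[i] = '=' ∧ ¬cs[i] = '(') ∧ ¬cs[i] = ')' := by
                simpa [not_or] using hep
              rw [if_neg (by simp [pvSingleA, hne.1.1, hne.1.2, hepf.1.1, hepf.1.2, hepf.2])]
              have hq2' : ¬cs[i] = '"' ∧ ¬cs[i] = '\'' := by simpa [not_or] using hq2
              have hws : pvWordStopA cs[i] = false := by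
                simp [pvWordStopA, hne.1.1, hne.1.2, hepf.1.1, hepf.1.2, hepf.2,
                  hq2'.1, hq2'.2]
              have hB1 : pvRun .idle (cs.drop i) =
                  pvRun (.word [cs[i]]) (cs.drop (i + 1)) := by
                rw [hd]
                simp [pvRun, pvStep, pvStepIdle, hspf, hq2f, hc3f,
                  (by simpa using hep : (cs[i] == '=' || cs[i] == '(' || cs[i] == ')') = false)]
              rw [hB1, pv_word_tail cs i hi hspf hws,
                ← ih (pvScanWordA cs cs.length i) (by
                  have := pvScanWordA_ge cs cs.length (i + 1)
                  have hscan : pvScanWordA cs cs.length i =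
                      pvScanWordA cs cs.length (i + 1) := by
                    rw [pvScanWordA]; simp [hi, hspf, hws]
                  omega),
                hsl (pvScanWordA cs cs.length i)]
    · have hin : cs.length ≤ i := by omega
      rw [pvLoopA]
      simp [Nat.not_lt.mpr hin, List.drop_eq_nil_of_le hin, pvRun, pvFlush]

-- ===== VERDICT (by name: the statement is the Claim_ definition above) =====
theorem tokenize_when_py_spec : Claim_equal_tokenize_when_py := by
  intro expr _
  unfold Spec_tokenize_when_py tokenize_when_py tokenize_when_py_alt
  simpa using pv_main expr.toList 0
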